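-- pv_equiv track=rewrite | github.com/NewYorkKim/TIL | Algorithm/Solve/PRO_17681.py | solution
-- ===== SOURCE A (Python) =====
-- def solution(n, arr1, arr2):
--     answer = []
--
--     for line1, line2 in zip(arr1, arr2):
--         line1 = str(format(line1, "b").zfill(n))
--         line2 = str(format(line2, "b").zfill(n))
--         tmp = ""
--
--         for i in range(n):
--             if line1[i] == "1" or line2[i] == "1":
--                 tmp += "#"
--             else:
--                 tmp += " "
--
--         answer.append(tmp)
--
--     return answer
-- ===== SOURCE B (Python) =====
-- def solution(n, arr1, arr2):
--     answer = []
--     for pair in zip(arr1, arr2):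
--         row = [" "] * n
--         for line in pair:
--             s = format(line, "b").zfill(n)
--             for i, c in zip(range(n), s):
--                 if c == "1":
--                     row[i] = "#"
--         answer.append("".join(row))
--     return answer
-- ===== Notes on version B (the rewrite author's own statement) =====
-- stated objective: alternative
-- what changed: Instead of one index loop that tests both binary strings per position and grows the row string by concatenation, B allocates a blank row buffer and makes one scatter pass per operand, stamping '#' at the positions of its '1' digits, then joins the buffer.
import Mathlib
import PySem

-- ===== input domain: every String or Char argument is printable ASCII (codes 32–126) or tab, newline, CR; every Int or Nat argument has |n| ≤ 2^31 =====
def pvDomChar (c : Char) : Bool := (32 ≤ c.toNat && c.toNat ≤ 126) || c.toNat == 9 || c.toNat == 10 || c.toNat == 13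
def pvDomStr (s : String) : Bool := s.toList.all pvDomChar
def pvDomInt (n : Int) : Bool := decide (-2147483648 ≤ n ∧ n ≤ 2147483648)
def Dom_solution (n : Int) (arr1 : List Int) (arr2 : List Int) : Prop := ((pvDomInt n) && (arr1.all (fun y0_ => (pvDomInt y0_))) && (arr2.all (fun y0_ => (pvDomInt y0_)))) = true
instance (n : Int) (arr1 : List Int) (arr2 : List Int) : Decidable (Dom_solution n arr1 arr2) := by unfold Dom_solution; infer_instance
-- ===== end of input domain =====

-- B replaces A's per-position OR test building the row by string concatenation with a blank
-- row buffer and one '#'-stamping scatter pass per operand (alternative decomposition, same cost).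


-- ===== PORT A =====
-- One row of A: line1/line2 rendered by format(_, "b").zfill(n) (str(…) of a str is the
-- identity), then the inner 'for i in range(n)' loop growing tmp.  'line1[i] == "1"' is
-- pyGet? … = some '1': exact, since zfill makes both strings at least n characters long,
-- so every i of range(n) indexes in range and Python never raises here.
def pvRowA (n : Int) (line1 : Int) (line2 : Int) : List Char :=
  let s1 := PySem.Chars.zfill (PySem.Int.toBinChars line1) n
  let s2 := PySem.Chars.zfill (PySem.Int.toBinChars line2) n
  (PySem.List.pyRange 0 n 1).foldl
    (fun tmp i =>
      if PySem.List.pyGet? s1 i = some '1' ∨ PySem.List.pyGet? s2 i = some '1'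
      then tmp ++ ['#'] else tmp ++ [' '])
    []

def solution (n : Int) (arr1 : List Int) (arr2 : List Int) : List String :=
  (arr1.zip arr2).foldl
    (fun answer p => answer ++ [String.ofList (pvRowA n p.1 p.2)]) []

-- ===== PORT B =====
-- One stamping pass of B: 'for i, c in zip(range(n), s): if c == "1": row[i] = "#"';
-- i comes from range(n) so 0 ≤ i < len(row), and Python's 'row[i] = "#"' is List.set i.toNat.
def pvStamp (row : List Char) (s : List Char) (n : Int) : List Char :=
  ((PySem.List.pyRange 0 n 1).zip s).foldl
    (fun r ic => if ic.2 = '1' then r.set ic.1.toNat '#' else r) row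

-- One row of B: row = [" "] * n (empty when n ≤ 0), then the 'for line in pair' loop =
-- one stamping pass per component of the pair, then '"".join(row)' = String.ofList.
def pvRowB (n : Int) (line1 : Int) (line2 : Int) : List Char :=
  pvStamp (pvStamp (List.replicate n.toNat ' ')
      (PySem.Chars.zfill (PySem.Int.toBinChars line1) n) n)
    (PySem.Chars.zfill (PySem.Int.toBinChars line2) n) n

def solution_alt (n : Int) (arr1 : List Int) (arr2 : List Int) : List String :=
  (arr1.zip arr2).foldl
    (fun answer p => answer ++ [String.ofList (pvRowB n p.1 p.2)]) []

-- ===== PRECONDITION & SPEC =====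
def Spec_solution (n : Int) (arr1 : List Int) (arr2 : List Int) (out : List String) : Prop := out = solution_alt n arr1 arr2
instance (n : Int) (arr1 : List Int) (arr2 : List Int) (out : List String) : Decidable (Spec_solution n arr1 arr2 out) := by unfold Spec_solution; infer_instance

-- ===== CLAIM (what is proved, stated in full; the proofs are below) =====
def Claim_equal_solution : Prop := ∀ (n : Int) (arr1 : List Int) (arr2 : List Int), Dom_solution n arr1 arr2 → Spec_solution n arr1 arr2 (solution n arr1 arr2)

-- ===== LEMMAS AND PROOFS =====

-- what one stamping fold leaves at position j: '#' where some listed in-range index j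
-- carries character '1', the old content everywhere else
theorem pvFold_getElem? (L : List (Int × Char)) (row : List Char) (j : Nat) :
    (L.foldl (fun r ic => if ic.2 = '1' then r.set ic.1.toNat '#' else r) row)[j]?
      = if j < row.length ∧ (∃ p ∈ L, p.1.toNat = j ∧ p.2 = '1')
        then some '#' else row[j]? := by
  induction L generalizing row with
  | nil => simp
  | cons p L ih =>
    simp only [List.foldl_cons]
    rw [ih]
    have hL : (if p.2 = '1' then row.set p.1.toNat '#' else row).length = row.length := by
      split <;> simp
    rw [hL]
    by_cases hc : p.2 = '1'
    · rw [if_pos hc, List.getElem?_set]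
      by_cases htail : j < row.length ∧ ∃ q ∈ L, q.1.toNat = j ∧ q.2 = '1'
      · rw [if_pos htail,
            if_pos ⟨htail.1, (List.exists_mem_cons_iff _ p L).mpr (Or.inr htail.2)⟩]
      · rw [if_neg htail]
        by_cases he : p.1.toNat = j
        · rw [he, if_pos rfl]
          by_cases hjl : j < row.length
          · rw [if_pos hjl,
                if_pos ⟨hjl, (List.exists_mem_cons_iff _ p L).mpr (Or.inl ⟨he, hc⟩)⟩]
          · rw [if_neg hjl, if_neg (fun h => hjl h.1),
                List.getElem?_eq_none (by omega)]
        · rw [if_neg he, if_neg ?_]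
          rintro ⟨hjl, hex⟩
          rcases (List.exists_mem_cons_iff _ p L).mp hex with ⟨he', _⟩ | hex'
          exacts [he he', htail ⟨hjl, hex'⟩]
    · rw [if_neg hc]
      simp only [List.exists_mem_cons_iff, hc, and_false, false_or]

-- the pairs zip(range(n), s) seen by the stamping pass are exactly (k, s[k]) for k < min n |s|
theorem pvMem_zip (n : Int) (s : List Char) (j : Nat) :
    (∃ p ∈ (PySem.List.pyRange 0 n 1).zip s, p.1.toNat = j ∧ p.2 = '1')
      ↔ ((j : Int) < n ∧ s[j]? = some '1') := by
  rw [PySem.List.pyRange_one]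
  constructor
  · rintro ⟨p, hp, h1, h2⟩
    obtain ⟨i, hi, hpe⟩ := List.mem_iff_getElem.mp hp
    have hi' := hi
    rw [List.length_zip, List.length_map, List.length_range] at hi'
    rw [List.getElem_zip] at hpe
    rw [← hpe] at h1 h2
    simp only [List.getElem_map, List.getElem_range, zero_add, Int.toNat_natCast] at h1 h2
    subst h1
    refine ⟨by omega, ?_⟩
    rw [List.getElem?_eq_getElem (by omega)]
    exact congrArg some h2
  · rintro ⟨h1, h2⟩
    obtain ⟨hjs, hj1⟩ := List.getElem?_eq_some_iff.mp h2
    have hj : j < (((List.range (n - 0).toNat).map (fun k => (0 : Int) + ↑k)).zip s).length := by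
      rw [List.length_zip, List.length_map, List.length_range]
      omega
    refine ⟨_, List.getElem_mem hj, ?_, ?_⟩
    · rw [List.getElem_zip]
      simp
    · rw [List.getElem_zip]
      exact hj1

-- the stamping pass pvStamp, characterised pointwise
theorem pvStamp_getElem? (row s : List Char) (n : Int) (j : Nat) :
    (pvStamp row s n)[j]?
      = if j < row.length ∧ ((j : Int) < n ∧ s[j]? = some '1')
        then some '#' else row[j]? := by
  unfold pvStamp
  simp only [pvFold_getElem?, pvMem_zip]

theorem pvStamp_length (row s : List Char) (n : Int) :
    (pvStamp row s n).length = row.length := by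
  unfold pvStamp
  generalize (PySem.List.pyRange 0 n 1).zip s = L
  induction L generalizing row with
  | nil => rfl
  | cons p L ih => simp only [List.foldl_cons, ih]; split <;> simp

-- A's row equals B's row
theorem pvRow_eq (n : Int) (line1 line2 : Int) :
    pvRowA n line1 line2 = pvRowB n line1 line2 := by
  simp only [pvRowA, pvRowB]
  set s1 := PySem.Chars.zfill (PySem.Int.toBinChars line1) n with hs1
  set s2 := PySem.Chars.zfill (PySem.Int.toBinChars line2) n with hs2
  have hstep : (fun (tmp : List Char) (i : Int) =>
      if PySem.List.pyGet? s1 i = some '1' ∨ PySem.List.pyGet? s2 i = some '1'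
      then tmp ++ ['#'] else tmp ++ [' '])
      = fun tmp i => tmp ++ [if PySem.List.pyGet? s1 i = some '1' ∨
            PySem.List.pyGet? s2 i = some '1' then '#' else ' '] := by
    funext tmp i
    split <;> simp_all
  rw [hstep, PySem.List.foldl_append_singleton_eq_map, List.nil_append,
      PySem.List.pyRange_one]
  apply List.ext_getElem?
  intro j
  rw [List.getElem?_map, pvStamp_getElem?, pvStamp_getElem?, pvStamp_length,
      List.length_replicate]
  by_cases hj : j < n.toNat
  · have hjn : (j : Int) < n := by omega
    rw [List.getElem?_eq_getElem (by simpa using hj)]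
    simp only [List.getElem_map, List.getElem_range, Option.map_some, zero_add,
      PySem.List.pyGet?_natCast]
    rw [List.getElem?_replicate, if_pos hj]
    by_cases h2 : s2[j]? = some '1' <;> by_cases h1 : s1[j]? = some '1' <;>
      simp [h1, h2, hj, hjn]
  · rw [List.getElem?_eq_none (by simp only [List.length_map, List.length_range]; omega),
        if_neg (fun h => hj h.1), if_neg (fun h => hj h.1), List.getElem?_replicate,
        if_neg hj]
    rfl

-- ===== VERDICT (by name: the statement is the Claim_ definition above) =====
theorem solution_spec : Claim_equal_solution := by
  intro n arr1 arr2 _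
  show solution n arr1 arr2 = solution_alt n arr1 arr2
  unfold solution solution_alt
  rw [PySem.List.foldl_append_singleton_eq_map, PySem.List.foldl_append_singleton_eq_map]
  simp [pvRow_eq]
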